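-- pv_equiv track=rewrite | github.com/KMnP/can | src/experiments/ultrafine_entity_typing/eval.py | stratify
-- ===== SOURCE A (Python) =====
-- def stratify(all_labels, types):
--     """
--     Divide label into three categories.
--     """
--     coarse = types[:9]
--     fine = types[9:130]
--     return (
--         [l for l in all_labels if l in coarse],
--         [l for l in all_labels if ((l in fine) and (not l in coarse))],
--         [l for l in all_labels if (not l in coarse) and (not l in fine)]
--     )
-- ===== SOURCE B (Python) =====
-- def stratify(all_labels, types):
--     """
--     Divide label into three categories via a precomputed hash index:
--     category number per type (coarse=0, fine=1, default 2), then one pass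
--     dispatching each label into buckets[category].
--     """
--     cat = {}
--     for t in types[9:130]:
--         cat[t] = 1
--     for t in types[:9]:
--         cat[t] = 0  # coarse overwrites: coarse precedence, as in A
--     buckets = ([], [], [])
--     for l in all_labels:
--         buckets[cat.get(l, 2)].append(l)
--     return buckets
-- ===== Notes on version B (the rewrite author's own statement) =====
-- stated objective: faster
-- what changed: Replaced three filtering comprehensions that each rescan the type slices for membership by a dict index mapping each type to its category number, built once, plus one dispatch pass appending each label to buckets[category]; the inner membership scans disappear.
import Mathlib
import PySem

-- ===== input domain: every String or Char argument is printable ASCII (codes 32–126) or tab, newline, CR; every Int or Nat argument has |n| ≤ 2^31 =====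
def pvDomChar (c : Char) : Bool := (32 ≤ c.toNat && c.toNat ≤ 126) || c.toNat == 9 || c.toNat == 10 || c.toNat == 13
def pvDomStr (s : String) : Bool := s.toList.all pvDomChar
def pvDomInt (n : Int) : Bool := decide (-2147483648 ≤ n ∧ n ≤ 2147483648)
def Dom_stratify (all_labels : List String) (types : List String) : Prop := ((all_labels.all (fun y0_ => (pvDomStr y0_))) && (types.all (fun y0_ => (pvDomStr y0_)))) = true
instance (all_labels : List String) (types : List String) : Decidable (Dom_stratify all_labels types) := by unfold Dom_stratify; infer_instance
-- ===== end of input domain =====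

-- B replaces three membership-filtering comprehensions by a category dict index built once plus one dispatch pass (faster: no inner scans).

-- ===== PORT A =====
-- Port of A: two slices, then three independent filtering comprehensions.
def stratify (all_labels : List String) (types : List String) : List String × List String × List String :=
  let coarse := PySem.List.slice types none (some 9)
  let fine := PySem.List.slice types (some 9) (some 130)
  ( all_labels.filter (fun l => l ∈ coarse),
    all_labels.filter (fun l => l ∈ fine ∧ ¬ l ∈ coarse),
    all_labels.filter (fun l => ¬ l ∈ coarse ∧ ¬ l ∈ fine) )

-- ===== PORT B =====
-- Port of B: build the category dict (fine=1 first, coarse=0 overwrites), then one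
-- dispatch pass appending each label to buckets[cat.get(l, 2)].
def stratify_alt (all_labels : List String) (types : List String) : List String × List String × List String :=
  let cat : PySem.Dict String Int :=
    (PySem.List.slice types (some 9) (some 130)).foldl (fun d t => d.insert t 1) PySem.Dict.empty
  let cat :=
    (PySem.List.slice types none (some 9)).foldl (fun d t => d.insert t 0) cat
  all_labels.foldl
    (fun b l =>
      let i := cat.getD l 2
      if i = 0 then (b.1 ++ [l], b.2.1, b.2.2)
      else if i = 1 then (b.1, b.2.1 ++ [l], b.2.2)
      else (b.1, b.2.1, b.2.2 ++ [l]))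
    ([], [], [])

-- ===== PRECONDITION & SPEC =====
def Spec_stratify (all_labels : List String) (types : List String) (out : List String × List String × List String) : Prop := out = stratify_alt all_labels types
instance (all_labels : List String) (types : List String) (out : List String × List String × List String) : Decidable (Spec_stratify all_labels types out) := by unfold Spec_stratify; infer_instance

-- ===== CLAIM =====
def Claim_equal_stratify : Prop := ∀ (all_labels : List String) (types : List String), Dom_stratify all_labels types → Spec_stratify all_labels types (stratify all_labels types)

-- ===== LEMMAS AND PROOFS =====

-- Inserting a constant value for every key of xs: lookup is v on xs, unchanged elsewhere.
lemma getD_foldl_insert_const (xs : List String) (v c : Int) (d : PySem.Dict String Int) (l : String) :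
    ((xs.foldl (fun d t => d.insert t v) d).getD l c) = if l ∈ xs then v else d.getD l c := by
  induction xs generalizing d with
  | nil => simp
  | cons t rest ih =>
    simp only [List.foldl_cons, ih, PySem.Dict.getD_insert, List.mem_cons]
    by_cases hr : l ∈ rest <;> by_cases ht : l = t <;> simp [hr, ht]

-- The category index computes A's membership tests.
lemma cat_getD (coarse fine : List String) (l : String) :
    ((coarse.foldl (fun d t => d.insert t (0 : Int))
        (fine.foldl (fun d t => d.insert t 1) PySem.Dict.empty)).getD l 2)
      = if l ∈ coarse then 0 else if l ∈ fine then 1 else 2 := by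
  rw [getD_foldl_insert_const, getD_foldl_insert_const]
  simp [PySem.Dict.getD_empty]

-- The dispatch pass, for any classifier g, produces the three filters.
lemma dispatch_foldl (g : String → Int) (xs : List String)
    (acc : List String × List String × List String) :
    xs.foldl
      (fun b l =>
        let i := g l
        if i = 0 then (b.1 ++ [l], b.2.1, b.2.2)
        else if i = 1 then (b.1, b.2.1 ++ [l], b.2.2)
        else (b.1, b.2.1, b.2.2 ++ [l])) acc
      = (acc.1 ++ xs.filter (fun l => g l = 0),
         acc.2.1 ++ xs.filter (fun l => g l = 1),
         acc.2.2 ++ xs.filter (fun l => g l ≠ 0 ∧ g l ≠ 1)) := by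
  induction xs generalizing acc with
  | nil => simp
  | cons l rest ih =>
    simp only [List.foldl_cons, ih, List.filter_cons]
    by_cases h0 : g l = 0 <;> by_cases h1 : g l = 1 <;> simp [h0, h1]

-- ===== VERDICT =====
theorem stratify_spec : Claim_equal_stratify := by
  intro all_labels types _
  unfold Spec_stratify stratify stratify_alt
  rw [dispatch_foldl]
  refine Prod.ext ?_ (Prod.ext ?_ ?_) <;>
    simp only [List.nil_append] <;>
    refine List.filter_congr (fun l _ => ?_) <;>
    rw [cat_getD] <;>
    by_cases hc : l ∈ PySem.List.slice types none (some 9) <;>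
    by_cases hf : l ∈ PySem.List.slice types (some 9) (some 130) <;>
    simp [hc, hf]
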